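-- pv_equiv track=rewrite | github.com/JZolko/Cyber_Breach_Data | Security_Breaches.py | top_methods_by_sector
-- ===== SOURCE A (Python) =====
-- def top_methods_by_sector(dic):
--     '''
--         This function sorts through a dict and pulls out the key words of the sectors
--         and sorts them based on number of occurences
--     '''
--
--     dec = {}
--     final = []
--
--     for key in dic.keys():
--         for lst in dic[key]: #this breaaks apart the dict into two parts and only looks at the second dict
--             d = lst[1]
--             for key in d:
--                 final.append(d[key])
--     #final = sorted(final, key= itemgetter(0, 1))
--     for i in final:
--
--         if not i[0] in dec.keys(): # makes a dict for the key
--             dec[i[0]] = {}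
--         if not i[1] in dec[i[0]].keys(): # sets the second word value to 1 initially
--             dec[i[0]][i[1]] = 1
--         else:
--             dec[i[0]][i[1]] += 1  # adds 1 to an existing word value
--
--     return dec
-- ===== SOURCE B (Python) =====
-- def top_methods_by_sector(dic):
--     '''Declarative grouping instead of incremental counting: flatten to a flat pair
--        list once, then build the nested dict by comprehension — outer keys are the
--        first-seen first words, inner keys the first-seen second words within the
--        group, and each count is obtained directly by pairs.count((a, b)).'''
--     pairs = [(v[0], v[1]) for lists in dic.values() for lst in lists for v in lst[1].values()]
--     firsts = list(dict.fromkeys(a for a, _ in pairs))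
--     return {a: {b: pairs.count((a, b))
--                 for b in dict.fromkeys(b2 for a2, b2 in pairs if a2 == a)}
--             for a in firsts}
-- ===== Notes on version B (the rewrite author's own statement) =====
-- stated objective: alternative
-- what changed: Replaces A's incremental nested-dict mutation (per-pair membership tests and += 1 on a dict of dicts) with a declarative grouping: flatten once to a flat pair list, then build the whole nested result in a comprehension over the first-seen keys, each count computed directly by pairs.count((a,b)); this trades A's O(n) dict updates for quadratic scans but removes all mutation and conditional branching.
import Mathlib
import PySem

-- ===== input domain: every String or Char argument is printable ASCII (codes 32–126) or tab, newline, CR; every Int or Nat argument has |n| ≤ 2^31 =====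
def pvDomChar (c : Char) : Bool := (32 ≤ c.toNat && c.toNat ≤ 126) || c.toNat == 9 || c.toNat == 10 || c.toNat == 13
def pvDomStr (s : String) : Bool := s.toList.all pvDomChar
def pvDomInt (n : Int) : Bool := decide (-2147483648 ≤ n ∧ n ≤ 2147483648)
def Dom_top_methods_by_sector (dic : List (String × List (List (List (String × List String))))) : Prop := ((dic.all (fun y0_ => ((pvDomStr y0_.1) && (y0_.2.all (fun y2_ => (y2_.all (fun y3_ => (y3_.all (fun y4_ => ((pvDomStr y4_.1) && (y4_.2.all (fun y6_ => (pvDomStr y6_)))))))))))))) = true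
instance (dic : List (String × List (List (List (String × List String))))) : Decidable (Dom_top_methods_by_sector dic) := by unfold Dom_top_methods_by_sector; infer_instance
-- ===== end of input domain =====

-- B replaces A's incremental nested-dict mutation by a declarative grouping over a
-- flat pair list: first-seen keys via ordered dedup, counts via pairs.count (objective: alternative).

-- Python passes the argument as a dict: this models building a dict from the
-- association-list input (duplicate keys overwrite in place); shared by both ports.
def pyDict {κ ν : Type} [BEq κ] (l : List (κ × ν)) : PySem.Dict κ ν :=
  PySem.Dict.empty.update l

-- ===== PORT A =====
def top_methods_by_sector (dic : List (String × List (List (List (String × List String))))) : List (String × List (String × Int)) :=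
  let dicD := pyDict dic
  -- for key in dic.keys(): for lst in dic[key]: d = lst[1]; for key in d: final.append(d[key])
  let final : List (List String) :=
    dicD.keys.foldl (fun final key =>
      (dicD.getD key []).foldl (fun final lst =>
        let d := pyDict (PySem.List.pyGetD lst 1 [])   -- lst[1]; IndexError excluded by Pre_
        d.keys.foldl (fun final key => final ++ [d.getD key []]) final) final) []
  let dec : PySem.Dict String (PySem.Dict String Int) :=
    final.foldl (fun dec i =>
      let a := PySem.List.pyGetD i 0 ""                -- i[0]; IndexError excluded by Pre_
      let b := PySem.List.pyGetD i 1 ""                -- i[1]; IndexError excluded by Pre_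
      let dec := if !(dec.contains a) then dec.insert a PySem.Dict.empty else dec
      let inner := dec.getD a PySem.Dict.empty
      if !(inner.contains b) then dec.insert a (inner.insert b 1)
      else dec.insert a (inner.modify b 0 (· + 1))) PySem.Dict.empty
  dec.items.map (fun kv => (kv.1, kv.2.items))

-- ===== PORT B =====
def top_methods_by_sector_alt (dic : List (String × List (List (List (String × List String))))) : List (String × List (String × Int)) :=
  let pairs : List (String × String) :=
    ((pyDict dic).values.flatMap (fun lists =>
        lists.flatMap (fun lst => (pyDict (PySem.List.pyGetD lst 1 [])).values))).map
      (fun v => (PySem.List.pyGetD v 0 "", PySem.List.pyGetD v 1 ""))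
  -- firsts = list(dict.fromkeys(a for a, _ in pairs))
  let firsts : List String := PySem.List.dedup (pairs.map (fun q => q.1))
  -- {a: {b: pairs.count((a, b)) for b in dict.fromkeys(...)} for a in firsts}
  firsts.map (fun a =>
    (a, (PySem.List.dedup ((pairs.filter (fun q => q.1 == a)).map (fun q => q.2))).map
          (fun b => (b, (pairs.count (a, b) : Int)))))

-- ===== PRECONDITION & SPEC =====
-- Pre_ excludes exactly the inputs on which the Python raises IndexError: some iterated
-- lst has no element at index 1, or some extracted value list has fewer than 2 elements.
def Pre_top_methods_by_sector (dic : List (String × List (List (List (String × List String))))) : Prop :=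
  ∀ lists ∈ (pyDict dic).values, ∀ lst ∈ lists,
    2 ≤ lst.length ∧ ∀ i ∈ (pyDict (PySem.List.pyGetD lst 1 [])).values, 2 ≤ i.length
instance (dic : List (String × List (List (List (String × List String))))) : Decidable (Pre_top_methods_by_sector dic) := by unfold Pre_top_methods_by_sector; infer_instance

def pvWitness_top_methods_by_sector : (List (String × List (List (List (String × List String))))) :=
  [("s", [[[], [("k", ["a", "b"])]]])]

def Spec_top_methods_by_sector (dic : List (String × List (List (List (String × List String))))) (out : List (String × List (String × Int))) : Prop := out = top_methods_by_sector_alt dic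
instance (dic : List (String × List (List (List (String × List String))))) (out : List (String × List (String × Int))) : Decidable (Spec_top_methods_by_sector dic out) := by unfold Spec_top_methods_by_sector; infer_instance

-- ===== CLAIM (what is proved, stated in full; the proofs are below) =====
def Claim_equal_top_methods_by_sector : Prop := ∀ (dic : List (String × List (List (List (String × List String))))), Dom_top_methods_by_sector dic → Pre_top_methods_by_sector dic → Spec_top_methods_by_sector dic (top_methods_by_sector dic)

-- ===== LEMMAS AND PROOFS =====

-- The per-pair update of the nested dict that A's loop body reduces to.
def stepN (dec : PySem.Dict String (PySem.Dict String Int)) (p : String × String) : PySem.Dict String (PySem.Dict String Int) :=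
  dec.modify p.1 PySem.Dict.empty (fun inn => inn.modify p.2 0 (· + 1))

theorem pyDict_keys_nodup {κ ν : Type} [BEq κ] [LawfulBEq κ] (l : List (κ × ν)) :
    (pyDict l).keys.Nodup :=
  PySem.Dict.nodup_keys_update _ l (by simp [PySem.Dict.keys_empty])

theorem stepA_eq (dec : PySem.Dict String (PySem.Dict String Int)) (a b : String) :
    (let dec' := if !(dec.contains a) then dec.insert a PySem.Dict.empty else dec
     let inner := dec'.getD a PySem.Dict.empty
     if !(inner.contains b) then dec'.insert a (inner.insert b 1)
     else dec'.insert a (inner.modify b 0 (· + 1))) = stepN dec (a, b) := by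
  by_cases hca : dec.contains a = true
  · simp only [stepN, hca, Bool.not_true, Bool.false_eq_true, if_false, PySem.Dict.modify]
    by_cases hcb : (dec.getD a PySem.Dict.empty).contains b = true
    · simp [hcb]
    · have h0 : (dec.getD a PySem.Dict.empty).getD b 0 = 0 :=
        PySem.Dict.getD_of_not_contains _ _ (eq_false_of_ne_true hcb)
      simp [hcb, h0]
  · have hf := eq_false_of_ne_true hca
    have hd0 : dec.getD a PySem.Dict.empty = PySem.Dict.empty :=
      PySem.Dict.getD_of_not_contains _ _ hf
    simp only [stepN, hf, Bool.not_false, if_true, PySem.Dict.getD_insert_self,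
      PySem.Dict.contains_empty, PySem.Dict.modify, hd0, PySem.Dict.getD_empty,
      PySem.Dict.insert_insert_self, Bool.not_false]
    norm_num

theorem finalA_eq (dic : List (String × List (List (List (String × List String))))) :
    (pyDict dic).keys.foldl (fun final key =>
        ((pyDict dic).getD key []).foldl (fun final lst =>
          let d := pyDict (PySem.List.pyGetD lst 1 [])
          d.keys.foldl (fun final key => final ++ [d.getD key []]) final) final) []
      = (pyDict dic).values.flatMap (fun lists =>
          lists.flatMap (fun lst => (pyDict (PySem.List.pyGetD lst 1 [])).values)) := by
  have hinner : ∀ (lst : List (List (String × List String))) (acc : List (List String)),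
      (let d := pyDict (PySem.List.pyGetD lst 1 [])
       d.keys.foldl (fun final key => final ++ [d.getD key []]) acc)
        = acc ++ (pyDict (PySem.List.pyGetD lst 1 [])).values := by
    intro lst acc
    show (pyDict (PySem.List.pyGetD lst 1 [])).keys.foldl
        (fun final key => final ++ [(pyDict (PySem.List.pyGetD lst 1 [])).getD key []]) acc = _
    rw [PySem.List.foldl_append_singleton_eq_map,
      ← PySem.Dict.values_eq_map_keys _ (pyDict_keys_nodup _) []]
  have hmid : ∀ (lists : List (List (List (String × List String)))) (acc : List (List String)),
      lists.foldl (fun final lst =>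
        let d := pyDict (PySem.List.pyGetD lst 1 [])
        d.keys.foldl (fun final key => final ++ [d.getD key []]) final) acc
      = acc ++ lists.flatMap (fun lst => (pyDict (PySem.List.pyGetD lst 1 [])).values) := by
    intro lists acc
    rw [PySem.List.foldl_congr_mem' lists _
        (fun acc lst => acc ++ (pyDict (PySem.List.pyGetD lst 1 [])).values) acc
        (fun lst _ acc => hinner lst acc),
      PySem.List.foldl_append_eq_flatMap]
  rw [PySem.List.foldl_congr_mem' _ _
      (fun acc key => acc ++ ((pyDict dic).getD key []).flatMap
        (fun lst => (pyDict (PySem.List.pyGetD lst 1 [])).values)) []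
      (fun key _ acc => hmid _ acc),
    PySem.List.foldl_append_eq_flatMap, List.nil_append,
    PySem.Dict.values_eq_map_keys (pyDict dic) (pyDict_keys_nodup _)
      ([] : List (List (List (String × List String)))),
    List.flatMap_map]

-- Lookup in the nested fold at key a is the counting fold of the seconds of a's group.
theorem getD_fold (l : List (String × String)) :
    ∀ (d : PySem.Dict String (PySem.Dict String Int)) (a : String),
    (l.foldl stepN d).getD a PySem.Dict.empty
      = ((l.filter (fun q => q.1 == a)).map (fun q => q.2)).foldl
          (fun inn b => inn.modify b 0 (· + 1)) (d.getD a PySem.Dict.empty) := by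
  induction l with
  | nil => intro d a; simp
  | cons p t ih =>
    intro d a
    simp only [List.foldl_cons, List.filter_cons]
    rw [ih]
    by_cases h : p.1 = a
    · have hb : (p.1 == a) = true := by simp [h]
      simp only [hb, if_true, List.map_cons, List.foldl_cons]
      congr 1
      simp [stepN, h]
    · have hb : (p.1 == a) = false := by simp [h]
      simp only [hb, Bool.false_eq_true, if_false]
      congr 1
      simp [stepN, PySem.Dict.getD_modify, Ne.symm h]

theorem keys_fold (l : List (String × String)) :
    (l.foldl stepN PySem.Dict.empty).keys = PySem.List.dedup (l.map (fun q => q.1)) := by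
  unfold stepN
  rw [PySem.Dict.keys_foldl_modify_key l (fun q : String × String => q.1)
    PySem.Dict.empty (fun _ p inn => inn.modify p.2 0 (· + 1)) PySem.Dict.empty]
  simp [PySem.Dict.keys_empty, PySem.Set.update_nil_left]

theorem nodup_keys_fold (l : List (String × String)) :
    (l.foldl stepN PySem.Dict.empty).keys.Nodup := by
  unfold stepN
  exact PySem.Dict.nodup_keys_foldl_modify_key l (fun q : String × String => q.1)
    PySem.Dict.empty (fun _ p inn => inn.modify p.2 0 (· + 1)) PySem.Dict.empty
    (by simp [PySem.Dict.keys_empty])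

theorem count_filter_snd (l : List (String × String)) (a b : String) :
    ((l.filter (fun q => q.1 == a)).map (fun q => q.2)).count b = l.count (a, b) := by
  induction l with
  | nil => rfl
  | cons p t ih =>
    simp only [List.filter_cons]
    by_cases h1 : p.1 = a
    · have hb : (p.1 == a) = true := by simp [h1]
      simp only [hb, if_true, List.map_cons]
      by_cases h2 : p.2 = b
      · have hp : p = (a, b) := Prod.ext h1 h2
        simp [ih, hp]
      · have hp : p ≠ (a, b) := fun hh => h2 (congrArg Prod.snd hh)
        simp [ih, h2, hp]
    · have hb : (p.1 == a) = false := by simp [h1]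
      have hp : p ≠ (a, b) := fun hh => h1 (congrArg Prod.fst hh)
      simp [hb, ih, hp]

-- A's nested fold, rendered as items, is exactly B's grouped comprehension.
theorem nested_items (l : List (String × String)) :
    (l.foldl stepN PySem.Dict.empty).items.map (fun kv => (kv.1, kv.2.items))
      = (PySem.List.dedup (l.map (fun q => q.1))).map (fun a =>
          (a, (PySem.List.dedup ((l.filter (fun q => q.1 == a)).map (fun q => q.2))).map
                (fun b => (b, (l.count (a, b) : Int))))) := by
  rw [PySem.Dict.items_eq_map_keys _ (nodup_keys_fold l) PySem.Dict.empty, List.map_map,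
    keys_fold l]
  apply List.map_congr_left
  intro a _
  simp only [Function.comp]
  congr 1
  rw [getD_fold l PySem.Dict.empty a, PySem.Dict.getD_empty, ← PySem.Dict.counter_eq_foldl,
    PySem.Dict.items_counter]
  simp only [PySem.List.dedup_eq_ofList]
  apply List.map_congr_left
  intro b _
  rw [count_filter_snd]

-- ===== VERDICT (by name: the statement is the Claim_ definition above) =====
theorem top_methods_by_sector_spec : Claim_equal_top_methods_by_sector := by
  intro dic _ _
  show top_methods_by_sector dic = top_methods_by_sector_alt dic
  simp only [top_methods_by_sector, top_methods_by_sector_alt]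
  rw [finalA_eq dic]
  rw [PySem.List.foldl_congr_mem' _ _
      (fun dec i => stepN dec (PySem.List.pyGetD i 0 "", PySem.List.pyGetD i 1 ""))
      PySem.Dict.empty (fun i _ dec => stepA_eq dec _ _)]
  rw [← List.foldl_map (f := fun v => (PySem.List.pyGetD v 0 "", PySem.List.pyGetD v 1 ""))
      (g := stepN)]
  exact nested_items _
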